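-- pv_equiv track=rewrite | github.com/Aasthaengg/IBMdataset | Python_codes/p03128/s199041153.py | is_big
-- ===== SOURCE A (Python) =====
-- def is_big(x = [0]*10, y = [0]*10):
--     if sum(x) > sum(y):
--         return True
--     if sum(x) < sum(y):
--         return False
--     for i in range(0,10)[::-1]:
--         if x[i] > y[i]:
--             return True
--         if y[i] > x[i]:
--             return False
--     return True
-- ===== SOURCE B (Python) =====
-- def is_big(x=[0]*10, y=[0]*10):
--     sx, sy = sum(x), sum(y)
--     if sx != sy:
--         return sx > sy
--     # Encode the first 10 positions as one big integer, position i weighted by BASE**i.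
--     # BASE = 2**33 exceeds twice the magnitude bound (2**31) of the inputs, so the
--     # weighted-sum comparison decides exactly the positional comparison from index 9 down,
--     # with equality giving True.
--     BASE = 1 << 33
--     vx = sum(v * BASE ** i for i, v in enumerate(x[:10]))
--     vy = sum(v * BASE ** i for i, v in enumerate(y[:10]))
--     return vx >= vy
-- ===== Notes on version B (the rewrite author's own statement) =====
-- stated objective: alternative
-- what changed: Replaces the descending index-by-index comparison loop by encoding each 10-element prefix as a single integer in base 2^33 (a position-weighted sum) and deciding the tie-break with one integer comparison; correct since element magnitudes are bounded by 2^31 on the stated domain.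
import Mathlib
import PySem

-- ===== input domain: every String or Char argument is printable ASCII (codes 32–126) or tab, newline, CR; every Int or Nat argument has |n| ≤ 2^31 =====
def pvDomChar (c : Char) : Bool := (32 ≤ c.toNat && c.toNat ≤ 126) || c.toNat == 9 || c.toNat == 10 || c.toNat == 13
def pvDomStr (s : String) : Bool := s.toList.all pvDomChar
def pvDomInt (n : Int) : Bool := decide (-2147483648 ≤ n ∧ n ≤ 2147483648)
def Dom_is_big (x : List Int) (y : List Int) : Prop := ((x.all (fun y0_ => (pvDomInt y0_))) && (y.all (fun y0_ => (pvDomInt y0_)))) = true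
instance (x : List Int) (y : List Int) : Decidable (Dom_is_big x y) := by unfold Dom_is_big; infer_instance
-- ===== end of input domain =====

-- B replaces A's descending positional loop by encoding each 10-element prefix as one integer in
-- base 2^33 (position-weighted sum) and comparing the two encodings (alternative, same cost).

-- ===== PORT A =====
-- the body of A's 'for i in range(0,10)[::-1]' loop; pyGet? none = IndexError (excluded by Pre_)
def is_big_loop (x : List Int) (y : List Int) : List Int → Bool
  | [] => true
  | i :: rest =>
    match PySem.List.pyGet? x i, PySem.List.pyGet? y i with
    | some xi, some yi =>
      if xi > yi then true
      else if yi > xi then false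
      else is_big_loop x y rest
    | _, _ => false   -- IndexError in Python; unreachable under Pre_is_big

def is_big (x : List Int) (y : List Int) : Bool :=
  if x.sum > y.sum then true
  else if x.sum < y.sum then false
  else
    -- range(0,10)[::-1]
    is_big_loop x y ((PySem.List.slice? (PySem.List.pyRange 0 10 1) none none (-1)).getD [])

-- ===== PORT B =====
def pvBASE : Int := 8589934592   -- 1 << 33

-- sum(v * BASE ** i for i, v in enumerate(l))
def pvEnc (l : List Int) : Int :=
  ((PySem.List.enumerate l 0).map (fun iv => iv.2 * pvBASE ^ iv.1.toNat)).sum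

def is_big_alt (x : List Int) (y : List Int) : Bool :=
  let sx := x.sum
  let sy := y.sum
  if sx ≠ sy then decide (sx > sy)
  else
    let vx := pvEnc (PySem.List.slice x none (some 10))
    let vy := pvEnc (PySem.List.slice y none (some 10))
    decide (vx ≥ vy)

-- ===== PRECONDITION & SPEC =====
-- Pre_ excludes exactly the inputs on which A raises IndexError: equal sums with either list
-- shorter than 10 (the loop then reads x[9]/y[9] past the end).
def Pre_is_big (x : List Int) (y : List Int) : Prop :=
  x.sum = y.sum → (10 ≤ x.length ∧ 10 ≤ y.length)
instance (x : List Int) (y : List Int) : Decidable (Pre_is_big x y) := by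
  unfold Pre_is_big; infer_instance

def pvWitness_is_big : List Int × List Int := ([1,2,3,4,5,6,7,8,9,0], [0,9,8,7,6,5,4,3,2,1])

def Spec_is_big (x : List Int) (y : List Int) (out : Bool) : Prop := out = is_big_alt x y
instance (x : List Int) (y : List Int) (out : Bool) : Decidable (Spec_is_big x y out) := by unfold Spec_is_big; infer_instance

-- ===== CLAIM (what is proved, stated in full; the proofs are below) =====
def Claim_equal_is_big : Prop := ∀ (x : List Int) (y : List Int), Dom_is_big x y → Pre_is_big x y → Spec_is_big x y (is_big x y)

-- ===== LEMMAS AND PROOFS =====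

-- Little-endian Horner form of the encoding (proof helper only).
def pvEncP : List Int → Int
  | [] => 0
  | c :: l => c + pvBASE * pvEncP l

-- Python's '>=' on equal-length int lists compared elementwise (A's loop, abstracted).
def pvRevGe : List Int → List Int → Bool
  | _, [] => true
  | [], _ :: _ => false
  | a :: as, b :: bs =>
    if a > b then true
    else if a < b then false
    else pvRevGe as bs

lemma pvEnc_aux (l : List Int) : ∀ (s : Nat),
    ((PySem.List.enumerate l (s : Int)).map (fun iv => iv.2 * pvBASE ^ iv.1.toNat)).sum
      = pvBASE ^ s * pvEncP l := by
  induction l with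
  | nil => intro s; simp [PySem.List.enumerate_nil, pvEncP]
  | cons c l ih =>
    intro s
    have h1 : ((s : Int) + 1) = ((s + 1 : Nat) : Int) := by push_cast; ring
    rw [PySem.List.enumerate_cons, List.map_cons, List.sum_cons, h1, ih (s + 1)]
    simp [pvEncP, Int.toNat_natCast, pow_succ]
    ring

lemma pvEnc_eq_encP (l : List Int) : pvEnc l = pvEncP l := by
  have := pvEnc_aux l 0
  simpa [pvEnc] using this

lemma pvEncP_append_singleton (l : List Int) (c : Int) :
    pvEncP (l ++ [c]) = pvEncP l + c * pvBASE ^ l.length := by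
  induction l with
  | nil => simp [pvEncP]
  | cons a l ih =>
    simp only [List.cons_append, pvEncP, ih, List.length_cons, pow_succ]
    ring

lemma pvBASE_pow_pos (n : Nat) : 0 < pvBASE ^ n :=
  pow_pos (by norm_num [pvBASE]) n

-- magnitude bound: with all |elements| ≤ 2^31, twice the encoding stays below BASE^len
lemma pvEncP_bound (l : List Int) (hb : ∀ v ∈ l, -2147483648 ≤ v ∧ v ≤ 2147483648) :
    2 * |pvEncP l| < pvBASE ^ l.length := by
  induction l with
  | nil => simp [pvEncP]
  | cons c l ih =>
    have hc := hb c (by simp)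
    have hl : ∀ v ∈ l, -2147483648 ≤ v ∧ v ≤ 2147483648 := fun v hv => hb v (by simp [hv])
    have h1 : 2 * |pvEncP l| < pvBASE ^ l.length := ih hl
    have h2 : |pvEncP (c :: l)| ≤ |c| + pvBASE * |pvEncP l| := by
      calc |pvEncP (c :: l)| = |c + pvBASE * pvEncP l| := by rw [pvEncP]
        _ ≤ |c| + |pvBASE * pvEncP l| := abs_add_le _ _
        _ = |c| + pvBASE * |pvEncP l| := by
              rw [abs_mul, abs_of_pos (by norm_num [pvBASE] : (0:Int) < pvBASE)]
      
    have hcabs : |c| ≤ 2147483648 := abs_le.mpr ⟨hc.1, hc.2⟩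
    have h3 : pvBASE * (2 * |pvEncP l|) ≤ pvBASE * (pvBASE ^ l.length - 1) := by
      have : 2 * |pvEncP l| ≤ pvBASE ^ l.length - 1 := by omega
      exact mul_le_mul_of_nonneg_left this (by norm_num [pvBASE])
    simp only [List.length_cons, pow_succ]
    have hB : pvBASE = 8589934592 := rfl
    nlinarith [h2, h3, abs_nonneg (pvEncP l)]

-- the whole-integer comparison of encodings equals the reversed elementwise comparison
lemma encP_ge_iff (r s : List Int) (hlen : r.length = s.length)
    (hr : ∀ v ∈ r, -2147483648 ≤ v ∧ v ≤ 2147483648)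
    (hs : ∀ v ∈ s, -2147483648 ≤ v ∧ v ≤ 2147483648) :
    decide (pvEncP r.reverse ≥ pvEncP s.reverse) = pvRevGe r s := by
  induction r generalizing s with
  | nil =>
    cases s with
    | nil => simp [pvRevGe, pvEncP]
    | cons d s' => simp at hlen
  | cons c r' ih =>
    cases s with
    | nil => simp at hlen
    | cons d s' =>
      have hlen' : r'.length = s'.length := by simpa using hlen
      have hr' : ∀ v ∈ r', -2147483648 ≤ v ∧ v ≤ 2147483648 := fun v hv => hr v (by simp [hv])
      have hs' : ∀ v ∈ s', -2147483648 ≤ v ∧ v ≤ 2147483648 := fun v hv => hs v (by simp [hv])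
      have hc := hr c (by simp)
      have hd := hs d (by simp)
      have hbr : 2 * |pvEncP r'.reverse| < pvBASE ^ r'.length := by
        have := pvEncP_bound r'.reverse (by intro v hv; exact hr' v (List.mem_reverse.mp hv))
        simpa using this
      have hbs : 2 * |pvEncP s'.reverse| < pvBASE ^ r'.length := by
        have := pvEncP_bound s'.reverse (by intro v hv; exact hs' v (List.mem_reverse.mp hv))
        simpa [hlen'] using this
      have her : pvEncP (c :: r').reverse = pvEncP r'.reverse + c * pvBASE ^ r'.length := by
        rw [List.reverse_cons, pvEncP_append_singleton]; simp
      have hes : pvEncP (d :: s').reverse = pvEncP s'.reverse + d * pvBASE ^ r'.length := by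
        rw [List.reverse_cons, pvEncP_append_singleton]; simp [hlen']
      have har1 := le_abs_self (pvEncP r'.reverse)
      have har2 := neg_abs_le (pvEncP r'.reverse)
      have has1 := le_abs_self (pvEncP s'.reverse)
      have has2 := neg_abs_le (pvEncP s'.reverse)
      rw [her, hes, pvRevGe]
      rcases lt_trichotomy d c with h | h | h
      · -- c > d : encoding difference dominated by (c-d)·B^n
        have hcd : 1 ≤ c - d := by omega
        have hpos := pvBASE_pow_pos r'.length
        have : pvEncP s'.reverse + d * pvBASE ^ r'.length ≤ pvEncP r'.reverse + c * pvBASE ^ r'.length := by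
          have h1 : pvEncP s'.reverse - pvEncP r'.reverse < pvBASE ^ r'.length := by omega
          nlinarith
        simp [h, this, ge_iff_le]
      · subst h
        simp only [lt_irrefl, if_false, ge_iff_le, add_le_add_iff_right]
        have := ih s' hlen' hr' hs'
        simpa [ge_iff_le] using this
      · -- c < d
        have hpos := pvBASE_pow_pos r'.length
        have : ¬ (pvEncP s'.reverse + d * pvBASE ^ r'.length ≤ pvEncP r'.reverse + c * pvBASE ^ r'.length) := by
          have h1 : pvEncP r'.reverse - pvEncP s'.reverse < pvBASE ^ r'.length := by omega
          have hcd : 1 ≤ d - c := by omega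
          nlinarith
        simp [show ¬ c > d by omega, h, ge_iff_le, this]

-- A's loop over the reversed range [n-1, …, 0] is the reversed elementwise comparison of prefixes
lemma loop_eq_revGe (n : Nat) : ∀ (x y : List Int), n ≤ x.length → n ≤ y.length →
    is_big_loop x y ((PySem.List.pyRange 0 (n : Int) 1).reverse) =
      pvRevGe (x.take n).reverse (y.take n).reverse := by
  induction n with
  | zero =>
    intro x y _ _
    simp [PySem.List.pyRange_one_eq_nil, is_big_loop, pvRevGe]
  | succ n ih =>
    intro x y hx hy
    have hxn : n < x.length := by omega
    have hyn : n < y.length := by omega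
    have hr : (PySem.List.pyRange 0 ((n + 1 : Nat) : Int) 1) =
        PySem.List.pyRange 0 (n : Int) 1 ++ [(n : Int)] := by
      push_cast
      exact PySem.List.pyRange_one_succ_right (by exact_mod_cast Nat.zero_le n)
    rw [hr, List.reverse_append]
    have hgx : PySem.List.pyGet? x (n : Int) = some x[n] := by
      simp [PySem.List.pyGet?_natCast, List.getElem?_eq_getElem hxn]
    have hgy : PySem.List.pyGet? y (n : Int) = some y[n] := by
      simp [PySem.List.pyGet?_natCast, List.getElem?_eq_getElem hyn]
    have htx : (x.take (n + 1)).reverse = x[n] :: (x.take n).reverse := by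
      rw [List.take_add_one, List.getElem?_eq_getElem hxn]
      simp
    have hty : (y.take (n + 1)).reverse = y[n] :: (y.take n).reverse := by
      rw [List.take_add_one, List.getElem?_eq_getElem hyn]
      simp
    rw [htx, hty]
    simp only [List.reverse_cons, List.reverse_nil, List.nil_append, List.singleton_append,
      is_big_loop, hgx, hgy, pvRevGe]
    split_ifs with h1 h2
    · rfl
    · rfl
    · exact ih x y (by omega) (by omega)

-- ===== VERDICT (by name: the statement is the Claim_ definition above) =====
theorem is_big_spec : Claim_equal_is_big := by
  intro x y hdom hpre
  unfold Spec_is_big is_big is_big_alt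
  by_cases hgt : x.sum > y.sum
  · simp [hgt]
    exact Or.inl (by omega)
  · by_cases hlt : x.sum < y.sum
    · simp [hlt, (by omega : ¬ x.sum > y.sum)]
      exact fun h => absurd h (by omega)
    · have heq : x.sum = y.sum := by omega
      obtain ⟨hx, hy⟩ := hpre heq
      simp only [Dom_is_big, Bool.and_eq_true, List.all_eq_true] at hdom
      rw [if_neg hgt, if_neg hlt]
      simp only [heq, ne_eq, not_true_eq_false, if_false]
      rw [PySem.List.slice?_none_none_neg_one, Option.getD_some,
        PySem.List.slice_to x (by norm_num : (0:Int) ≤ 10),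
        PySem.List.slice_to y (by norm_num : (0:Int) ≤ 10)]
      have hbx : ∀ v ∈ (x.take 10).reverse, -2147483648 ≤ v ∧ v ≤ 2147483648 := by
        intro v hv
        have hvx : v ∈ x := List.mem_of_mem_take (List.mem_reverse.mp hv)
        have := hdom.1 v hvx
        simpa [pvDomInt] using this
      have hby : ∀ v ∈ (y.take 10).reverse, -2147483648 ≤ v ∧ v ≤ 2147483648 := by
        intro v hv
        have hvy : v ∈ y := List.mem_of_mem_take (List.mem_reverse.mp hv)
        have := hdom.2 v hvy
        simpa [pvDomInt] using this
      have hlen : ((x.take 10).reverse).length = ((y.take 10).reverse).length := by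
        simp [List.length_take]
        omega
      have henc := encP_ge_iff ((x.take 10).reverse) ((y.take 10).reverse) hlen hbx hby
      have hloop := loop_eq_revGe 10 x y hx hy
      have h10 : ((10 : Int)) = ((10 : Nat) : Int) := by norm_num
      rw [h10]
      rw [hloop, ← henc]
      simp [pvEnc_eq_encP]
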